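-- pv_equiv track=rewrite | github.com/PaddlePaddle/PaddleHub | modules/text/simultaneous_translation/stacl/transformer_nist_wait_all/processor.py | post_process_seq
-- ===== SOURCE A (Python) =====
-- def post_process_seq(seq,
--                      bos_idx=0,
--                      eos_idx=1,
--                      output_bos=False,
--                      output_eos=False):
--     """
--     Post-process the decoded sequence.
--     """
--     eos_pos = len(seq) - 1
--     for i, idx in enumerate(seq):
--         if idx == eos_idx:
--             eos_pos = i
--             break
--     seq = [
--         idx for idx in seq[:eos_pos + 1]
--         if (output_bos or idx != bos_idx) and (output_eos or idx != eos_idx)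
--     ]
--     return seq
-- ===== SOURCE B (Python) =====
-- def post_process_seq(seq,
--                      bos_idx=0,
--                      eos_idx=1,
--                      output_bos=False,
--                      output_eos=False):
--     """Single pass: filter and stop at the first EOS in one traversal."""
--     out = []
--     for idx in seq:
--         if idx == eos_idx:
--             if output_eos and (output_bos or idx != bos_idx):
--                 out.append(idx)
--             break
--         if output_bos or idx != bos_idx:
--             out.append(idx)
--     return out
-- ===== Notes on version B (the rewrite author's own statement) =====
-- stated objective: simpler
-- what changed: Replaced A's two phases (an enumerate loop to find the first EOS position, then a slice plus a filtering comprehension) by a single early-terminating pass that filters as it scans and breaks at the first EOS.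
import Mathlib
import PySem

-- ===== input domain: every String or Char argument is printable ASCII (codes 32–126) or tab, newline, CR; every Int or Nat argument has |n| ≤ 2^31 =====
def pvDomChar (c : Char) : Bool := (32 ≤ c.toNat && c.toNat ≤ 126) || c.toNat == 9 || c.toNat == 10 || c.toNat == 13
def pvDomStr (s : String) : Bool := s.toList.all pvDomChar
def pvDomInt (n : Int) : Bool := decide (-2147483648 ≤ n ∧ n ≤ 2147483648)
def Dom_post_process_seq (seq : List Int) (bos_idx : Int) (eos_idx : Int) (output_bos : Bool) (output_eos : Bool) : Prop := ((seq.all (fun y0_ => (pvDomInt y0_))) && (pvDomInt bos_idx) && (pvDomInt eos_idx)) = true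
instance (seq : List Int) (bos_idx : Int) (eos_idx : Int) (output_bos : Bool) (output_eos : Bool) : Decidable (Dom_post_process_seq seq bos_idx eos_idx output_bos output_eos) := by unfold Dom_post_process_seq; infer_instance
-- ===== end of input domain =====

-- B fuses A's EOS-search loop and filtering comprehension into one early-terminating pass (objective: simpler).

-- ===== PORT A =====
-- A's first loop: scan `enumerate(seq)` for the first element equal to eos_idx;
-- `i` is the running index, `d` the initial value `len(seq) - 1` of eos_pos.
def pvFindEos : List Int → Int → Int → Int → Int
  | [], _, _, d => d
  | x :: xs, eos, i, d => if x = eos then i else pvFindEos xs eos (i + 1) d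

def post_process_seq (seq : List Int) (bos_idx : Int) (eos_idx : Int) (output_bos : Bool) (output_eos : Bool) : List Int :=
  let eos_pos := pvFindEos seq eos_idx 0 ((seq.length : Int) - 1)
  (PySem.List.slice seq none (some (eos_pos + 1))).filter
    (fun idx => (output_bos || idx != bos_idx) && (output_eos || idx != eos_idx))

-- ===== PORT B =====
-- B's single loop with break, as structural recursion over seq.
def pvTrimLoop (bos_idx : Int) (eos_idx : Int) (output_bos : Bool) (output_eos : Bool) : List Int → List Int
  | [] => []
  | idx :: rest =>
    if idx = eos_idx then
      (if output_eos && (output_bos || idx != bos_idx) then [idx] else [])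
    else
      if output_bos || idx != bos_idx then idx :: pvTrimLoop bos_idx eos_idx output_bos output_eos rest
      else pvTrimLoop bos_idx eos_idx output_bos output_eos rest

def post_process_seq_alt (seq : List Int) (bos_idx : Int) (eos_idx : Int) (output_bos : Bool) (output_eos : Bool) : List Int :=
  pvTrimLoop bos_idx eos_idx output_bos output_eos seq

-- ===== PRECONDITION & SPEC =====
def Spec_post_process_seq (seq : List Int) (bos_idx : Int) (eos_idx : Int) (output_bos : Bool) (output_eos : Bool) (out : List Int) : Prop := out = post_process_seq_alt seq bos_idx eos_idx output_bos output_eos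
instance (seq : List Int) (bos_idx : Int) (eos_idx : Int) (output_bos : Bool) (output_eos : Bool) (out : List Int) : Decidable (Spec_post_process_seq seq bos_idx eos_idx output_bos output_eos out) := by unfold Spec_post_process_seq; infer_instance

-- ===== CLAIM (what is proved, stated in full; the proofs are below) =====
def Claim_equal_post_process_seq : Prop := ∀ (seq : List Int) (bos_idx : Int) (eos_idx : Int) (output_bos : Bool) (output_eos : Bool), Dom_post_process_seq seq bos_idx eos_idx output_bos output_eos → Spec_post_process_seq seq bos_idx eos_idx output_bos output_eos (post_process_seq seq bos_idx eos_idx output_bos output_eos)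

-- ===== LEMMAS AND PROOFS =====
-- Shifting both the running index and the default by one shifts the result by one.
theorem pvFindEos_shift (xs : List Int) (eos i d : Int) :
    pvFindEos xs eos (i + 1) (d + 1) = pvFindEos xs eos i d + 1 := by
  induction xs generalizing i with
  | nil => rfl
  | cons x xs ih =>
    unfold pvFindEos
    split
    · rfl
    · exact ih (i + 1)

theorem pvFindEos_ge (xs : List Int) (eos i d : Int) (hi : -1 ≤ i) (hd : -1 ≤ d) :
    -1 ≤ pvFindEos xs eos i d := by
  induction xs generalizing i with
  | nil => exact hd
  | cons x xs ih =>
    unfold pvFindEos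
    split
    · exact hi
    · exact ih (i + 1) (by omega)

theorem post_process_seq_eq_alt (seq : List Int) (bos_idx eos_idx : Int) (ob oe : Bool) :
    post_process_seq seq bos_idx eos_idx ob oe = post_process_seq_alt seq bos_idx eos_idx ob oe := by
  induction seq with
  | nil => rfl
  | cons x xs ih =>
    by_cases hx : x = eos_idx
    · -- A: eos_pos = 0, keep [x] iff the compound filter holds; B: break-case.
      simp only [post_process_seq, post_process_seq_alt, pvFindEos, pvTrimLoop]
      rw [if_pos hx, if_pos hx]
      rw [PySem.List.slice_to _ (by omega : (0:Int) ≤ 0 + 1)]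
      by_cases hbo : eos_idx = bos_idx <;> cases oe <;> cases ob <;>
        simp [List.filter, hx, hbo, bne, Bool.and_comm]
    · -- A: eos_pos shifts by one relative to the tail; B: keeps filtering.
      have hge : -1 ≤ pvFindEos xs eos_idx 0 ((xs.length : Int) - 1) :=
        pvFindEos_ge xs eos_idx 0 _ (by omega) (by omega)
      simp only [post_process_seq, post_process_seq_alt, pvFindEos, if_neg hx]
      have hlen : ((x :: xs).length : Int) - 1 = ((xs.length : Int) - 1) + 1 := by
        simp
      rw [hlen, pvFindEos_shift]
      set e := pvFindEos xs eos_idx 0 ((xs.length : Int) - 1) with he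
      rw [PySem.List.slice_to _ (by omega : (0:Int) ≤ e + 1 + 1)]
      have ht : (e + 1 + 1).toNat = (e + 1).toNat + 1 := by omega
      rw [ht]
      simp only [List.take_succ_cons, List.filter]
      have hxne : (x != eos_idx) = true := by simp [hx]
      rw [← PySem.List.slice_to xs (by omega : (0:Int) ≤ e + 1)]
      simp only [post_process_seq, post_process_seq_alt] at ih
      rw [← he] at ih
      rw [pvTrimLoop, if_neg hx]
      by_cases hb : (ob || x != bos_idx) = true
      · simp only [hxne, hb, Bool.or_true, Bool.and_true]
        simp [ih]
      · simp only [hxne]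
        simp [hb, ih]

-- ===== VERDICT (by name: the statement is the Claim_ definition above) =====
theorem post_process_seq_spec : Claim_equal_post_process_seq := by
  intro seq bos eos ob oe _
  exact post_process_seq_eq_alt seq bos eos ob oe
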